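-- pv_equiv track=rewrite | github.com/pypi-data/pypi-mirror-404 | packages/synalinks/synalinks-0.6.11-py3-none-any.whl/synalinks/src/utils/mcp/tools.py | _has_docstring_section
-- ===== SOURCE A (Python) =====
-- def _has_docstring_section(docstring: str, section: str) -> bool:
--     """Check if a docstring already contains a specific section (Args, Returns, etc.)."""
--     if not docstring:
--         return False
--
--     # Look for common docstring section patterns
--     section_patterns = [
--         f"\n{section}:",
--         f"\n{section.lower()}:",
--         f"\n{section.upper()}:",
--         f"\n{section.capitalize()}:",
--     ]
--
--     return any(pattern in docstring for pattern in section_patterns)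
-- ===== SOURCE B (Python) =====
-- def _has_docstring_section(docstring: str, section: str) -> bool:
--     """Check if a docstring already contains a specific section (Args, Returns, etc.)."""
--     if not docstring:
--         return False
--
--     variants = (
--         f"{section}:",
--         f"{section.lower()}:",
--         f"{section.upper()}:",
--         f"{section.capitalize()}:",
--     )
--
--     # Single left-to-right pass: a pattern "\n<variant>" occurs in the docstring
--     # exactly when some variant starts right after a newline character.
--     for i, ch in enumerate(docstring):
--         if ch == "\n" and docstring.startswith(variants, i + 1):
--             return True
--     return False
-- ===== Notes on version B (the rewrite author's own statement) =====
-- stated objective: alternative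
-- what changed: Replaces four independent whole-string substring searches with a single left-to-right scan that, at each newline, prefix-tests the four header variants built once up front.
import Mathlib
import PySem

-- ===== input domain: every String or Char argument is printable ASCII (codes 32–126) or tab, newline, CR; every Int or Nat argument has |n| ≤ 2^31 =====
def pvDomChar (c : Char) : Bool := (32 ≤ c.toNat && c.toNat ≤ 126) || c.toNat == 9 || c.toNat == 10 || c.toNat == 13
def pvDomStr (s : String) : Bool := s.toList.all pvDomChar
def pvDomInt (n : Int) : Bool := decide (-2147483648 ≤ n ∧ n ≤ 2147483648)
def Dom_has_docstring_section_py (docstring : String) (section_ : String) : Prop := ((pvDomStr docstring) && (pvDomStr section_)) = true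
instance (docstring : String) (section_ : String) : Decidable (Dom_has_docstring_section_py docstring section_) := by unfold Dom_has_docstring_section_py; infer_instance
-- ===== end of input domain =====

-- B replaces A's four whole-string substring searches by one left-to-right scan that
-- prefix-tests the four precomputed header variants after each newline (alternative decomposition).


-- shared helper for Python's str.capitalize(): first char uppercased, rest lowered
-- (exact on ASCII: Python's title-case of the first char coincides with upper there)
def pvCapitalize (cs : List Char) : List Char :=
  match cs with
  | [] => []
  | c :: t => PySem.Chars.upperChar c :: PySem.Chars.lower t

-- ===== PORT A =====
def has_docstring_section_py (docstring : String) (section_ : String) : Bool :=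
  if docstring.toList = [] then false
  else
    let s := section_.toList
    let section_patterns : List (List Char) :=
      [ '\n' :: (s ++ [':'])
      , '\n' :: (PySem.Chars.lower s ++ [':'])
      , '\n' :: (PySem.Chars.upper s ++ [':'])
      , '\n' :: (pvCapitalize s ++ [':']) ]
    section_patterns.any (fun p => PySem.Chars.isIn p docstring.toList)

-- ===== PORT B =====
-- the enumerate loop: at each '\n', test whether the remaining suffix starts with a variant
def pvScan (variants : List (List Char)) : List Char → Bool
  | [] => false
  | c :: rest =>
      (c == '\n' && variants.any (fun v => PySem.Chars.startswith rest v)) || pvScan variants rest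

def has_docstring_section_py_alt (docstring : String) (section_ : String) : Bool :=
  if docstring.toList = [] then false
  else
    let s := section_.toList
    let variants : List (List Char) :=
      [ s ++ [':']
      , PySem.Chars.lower s ++ [':']
      , PySem.Chars.upper s ++ [':']
      , pvCapitalize s ++ [':'] ]
    pvScan variants docstring.toList

-- ===== PRECONDITION & SPEC =====
def Spec_has_docstring_section_py (docstring : String) (section_ : String) (out : Bool) : Prop := out = has_docstring_section_py_alt docstring section_
instance (docstring : String) (section_ : String) (out : Bool) : Decidable (Spec_has_docstring_section_py docstring section_ out) := by unfold Spec_has_docstring_section_py; infer_instance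

-- ===== CLAIM (what is proved, stated in full; the proofs are below) =====
def Claim_equal_has_docstring_section_py : Prop := ∀ (docstring : String) (section_ : String), Dom_has_docstring_section_py docstring section_ → Spec_has_docstring_section_py docstring section_ (has_docstring_section_py docstring section_)

-- ===== LEMMAS AND PROOFS =====

-- the scan finds exactly the occurrences of "\n" ++ v for some variant v
theorem pvScan_eq_any_isIn (variants : List (List Char)) (cs : List Char) :
    pvScan variants cs = variants.any (fun v => PySem.Chars.isIn ('\n' :: v) cs) := by
  induction cs with
  | nil =>
      simp [pvScan, PySem.Chars.isIn_iff_infix]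
  | cons c rest ih =>
      rw [Bool.eq_iff_iff]
      simp only [pvScan, ih, Bool.or_eq_true, Bool.and_eq_true, List.any_eq_true,
        PySem.Chars.isIn_iff_infix, PySem.Chars.startswith_iff, beq_iff_eq,
        List.infix_cons_iff, List.cons_prefix_cons]
      constructor
      · rintro (⟨hc, v, hv, hp⟩ | ⟨v, hv, h⟩)
        · exact ⟨v, hv, Or.inl ⟨hc.symm, hp⟩⟩
        · exact ⟨v, hv, Or.inr h⟩
      · rintro ⟨v, hv, ⟨hc, hp⟩ | h⟩
        · exact Or.inl ⟨hc.symm, v, hv, hp⟩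
        · exact Or.inr ⟨v, hv, h⟩

-- ===== VERDICT (by name: the statement is the Claim_ definition above) =====
theorem has_docstring_section_py_spec : Claim_equal_has_docstring_section_py := by
  intro docstring section_ _
  unfold Spec_has_docstring_section_py has_docstring_section_py has_docstring_section_py_alt
  split
  · rfl
  · rw [pvScan_eq_any_isIn]
    simp [List.any]
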